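-- pv_equiv track=rewrite | github.com/thehalleyyoung/halley-labs | divelicit-mechanism-design/implementation/src/collective_intelligence.py | _tournament_bracket
-- ===== SOURCE A (Python) =====
-- from typing import Callable, List, Optional, Sequence, Tuple
--
-- def _tournament_bracket(
--     n_participants: int,
--     n_stages: int,
-- ) -> List[List[int]]:
--     """Organise tournament stages determining how many participants advance.
--
--     At each stage roughly the top half advances (minimum 1).
--
--     Args:
--         n_participants: Total number of participants.
--         n_stages: Number of tournament stages.
--
--     Returns:
--         List of lists; each inner list gives indices of participants
--         advancing into that stage. Stage 0 contains all participants.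
--     """
--     stages: List[List[int]] = [list(range(n_participants))]
--     current = n_participants
--     for _ in range(1, n_stages):
--         current = max(1, current // 2)
--         # Placeholder: actual indices filled during tournament execution
--         stages.append(list(range(current)))
--     return stages
-- ===== SOURCE B (Python) =====
-- from typing import List
--
--
-- def _tournament_bracket(
--     n_participants: int,
--     n_stages: int,
-- ) -> List[List[int]]:
--     # Divide and conquer on the stage axis: split the stages in half, build the
--     # first-half bracket recursively, read the second half's entry count off
--     # the size of the first half's last stage, build the second half, and
--     # concatenate.  Recursion depth is O(log n_stages).
--     if n_stages <= 1:
--         return [list(range(n_participants))]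
--     h = (n_stages + 1) // 2
--     left = _tournament_bracket(n_participants, h)
--     right = _tournament_bracket(max(1, len(left[-1]) // 2), n_stages - h)
--     return left + right
-- ===== Notes on version B (the rewrite author's own statement) =====
-- stated objective: alternative
-- what changed: Replaces A's sequential loop with a mutable running count by a divide-and-conquer on the stage axis: the stage list is split in half, each half is built recursively, and the second half's entry count is read off the size of the first half's last stage.
import Mathlib
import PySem

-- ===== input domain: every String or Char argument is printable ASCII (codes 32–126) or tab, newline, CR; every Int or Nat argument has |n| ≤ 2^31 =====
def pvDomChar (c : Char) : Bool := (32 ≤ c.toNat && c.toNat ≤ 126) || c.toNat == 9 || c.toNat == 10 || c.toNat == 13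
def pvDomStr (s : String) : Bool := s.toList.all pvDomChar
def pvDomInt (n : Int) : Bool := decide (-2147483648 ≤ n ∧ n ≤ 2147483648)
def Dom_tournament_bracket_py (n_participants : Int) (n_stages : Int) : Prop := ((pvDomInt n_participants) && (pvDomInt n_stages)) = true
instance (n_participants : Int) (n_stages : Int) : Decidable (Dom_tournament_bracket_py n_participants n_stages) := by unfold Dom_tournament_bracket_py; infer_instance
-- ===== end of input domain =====

-- B replaces A's sequential loop over a mutable running count by a divide-and-conquer
-- on the stage axis (halves built recursively and concatenated); same total cost
-- (objective: alternative).

-- ===== PORT A =====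
def tournament_bracket_py (n_participants : Int) (n_stages : Int) : List (List Int) :=
  let stages : List (List Int) := [PySem.List.pyRange 0 n_participants 1]
  let st :=
    (PySem.List.pyRange 1 n_stages 1).foldl
      (fun (st : List (List Int) × Int) (_ : Int) =>
        let current := max 1 (PySem.Int.floordiv st.2 2)
        (st.1 ++ [PySem.List.pyRange 0 current 1], current))
      (stages, n_participants)
  st.1

-- ===== PORT B =====
-- left[-1] is ported as pyGet? left (-1) with a .getD [] totalisation (left is
-- never empty, so Python never raises there); len(·) is List.length cast to Int.
def tournament_bracket_py_alt (n_participants : Int) (n_stages : Int) : List (List Int) :=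
  if n_stages ≤ 1 then [PySem.List.pyRange 0 n_participants 1]
  else
    let h := PySem.Int.floordiv (n_stages + 1) 2
    let left := tournament_bracket_py_alt n_participants h
    let right := tournament_bracket_py_alt
      (max 1 (PySem.Int.floordiv (((PySem.List.pyGet? left (-1)).getD []).length : Int) 2))
      (n_stages - h)
    left ++ right
termination_by n_stages.toNat
decreasing_by
  · rw [PySem.Int.floordiv_eq_ediv_of_pos (by norm_num : (0:Int) < 2)]; omega
  · rw [PySem.Int.floordiv_eq_ediv_of_pos (by norm_num : (0:Int) < 2)]; omega

-- ===== PRECONDITION & SPEC =====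
def Spec_tournament_bracket_py (n_participants : Int) (n_stages : Int) (out : List (List Int)) : Prop := out = tournament_bracket_py_alt n_participants n_stages
instance (n_participants : Int) (n_stages : Int) (out : List (List Int)) : Decidable (Spec_tournament_bracket_py n_participants n_stages out) := by unfold Spec_tournament_bracket_py; infer_instance

-- ===== CLAIM (what is proved, stated in full; the proofs are below) =====
def Claim_equal_tournament_bracket_py : Prop := ∀ (n_participants : Int) (n_stages : Int), Dom_tournament_bracket_py n_participants n_stages → Spec_tournament_bracket_py n_participants n_stages (tournament_bracket_py n_participants n_stages)

-- ===== LEMMAS AND PROOFS =====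

/-- One halving step on the running count. -/
def pvF (c : Int) : Int := max 1 (PySem.Int.floordiv c 2)

/-- The running count after `m` halving steps from `c`. -/
def pvCnt (c : Int) : Nat → Int
  | 0 => c
  | m + 1 => pvCnt (pvF c) m

/-- The tail of a bracket: `m` further stages generated from running count `c`. -/
def pvTail (c : Int) : Nat → List (List Int)
  | 0 => []
  | m + 1 => PySem.List.pyRange 0 (pvF c) 1 :: pvTail (pvF c) m

/-- The canonical bracket: stage 0 then the tail. -/
def pvBkt (n k : Int) : List (List Int) :=
  PySem.List.pyRange 0 n 1 :: pvTail n (k - 1).toNat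

lemma pvCnt_succ' (c : Int) (m : Nat) : pvCnt c (m + 1) = pvF (pvCnt c m) := by
  induction m generalizing c with
  | zero => rfl
  | succ m ih => rw [pvCnt, ih, pvCnt]

/-- Splitting the tail at any point. -/
lemma pvTail_add (a b : Nat) : ∀ c, pvTail c (a + b) = pvTail c a ++ pvTail (pvCnt c a) b := by
  induction a with
  | zero => intro c; simp [pvTail, pvCnt]
  | succ a ih =>
    intro c
    have : a + 1 + b = (a + b) + 1 := by omega
    rw [this, pvTail, pvTail, ih, pvCnt]
    simp

/-- A's fold, with the loop variable ignored, produces `pvTail` of the list's length. -/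
lemma pv_foldA (l : List Int) : ∀ (acc : List (List Int)) (c : Int),
    (l.foldl
      (fun (st : List (List Int) × Int) (_ : Int) =>
        let current := max 1 (PySem.Int.floordiv st.2 2)
        (st.1 ++ [PySem.List.pyRange 0 current 1], current))
      (acc, c)).1
    = acc ++ pvTail c l.length := by
  induction l with
  | nil => intro acc c; simp [pvTail]
  | cons x l ih =>
    intro acc c
    simp only [List.foldl_cons, List.length_cons]
    rw [ih]
    simp [pvTail, pvF]

/-- The last stage of the canonical bracket. -/
lemma pv_last (c : Int) (m : Nat) :
    (PySem.List.pyGet? (PySem.List.pyRange 0 c 1 :: pvTail c m) (-1)).getD []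
      = PySem.List.pyRange 0 (pvCnt c m) 1 := by
  induction m generalizing c with
  | zero => simp [pvTail, pvCnt, PySem.List.pyGet?, PySem.List.pyIdx?]
  | succ m ih =>
    rw [pvTail]
    have h2 : ∀ (x y : List Int) (l : List (List Int)),
        PySem.List.pyGet? (x :: y :: l) (-1) = PySem.List.pyGet? (y :: l) (-1) := by
      intro x y l
      simp [PySem.List.pyGet?, PySem.List.pyIdx?]
      rfl
    rw [h2, ih, pvCnt]

/-- `pvF` only sees the clamped count: halving the length of `range c` is halving `c`. -/
lemma pvF_clamp (c : Int) : pvF (max 0 c) = pvF c := by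
  unfold pvF
  rw [PySem.Int.floordiv_eq_ediv_of_pos (by norm_num : (0:Int) < 2),
      PySem.Int.floordiv_eq_ediv_of_pos (by norm_num : (0:Int) < 2)]
  omega

/-- B's divide-and-conquer produces the canonical bracket. -/
lemma pv_altB (n k : Int) : tournament_bracket_py_alt n k = pvBkt n k := by
  rw [tournament_bracket_py_alt]
  by_cases h : k ≤ 1
  · have h0 : (k - 1).toNat = 0 := by omega
    simp [h, pvBkt, h0, pvTail]
  · simp only [h, if_false]
    have hh : PySem.Int.floordiv (k + 1) 2 = (k + 1) / 2 :=
      PySem.Int.floordiv_eq_ediv_of_pos (by norm_num)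
    have hhk : PySem.Int.floordiv (k + 1) 2 < k ∧ 1 ≤ PySem.Int.floordiv (k + 1) 2 := by
      rw [hh]; omega
    rw [pv_altB n (PySem.Int.floordiv (k + 1) 2),
        pv_altB _ (k - PySem.Int.floordiv (k + 1) 2)]
    set h' := PySem.Int.floordiv (k + 1) 2 with hdef
    unfold pvBkt
    rw [pv_last]
    have hlen : ((PySem.List.pyRange 0 (pvCnt n (h' - 1).toNat) 1).length : Int)
        = max 0 (pvCnt n (h' - 1).toNat) := by
      rw [PySem.List.length_pyRange_one]; omega
    rw [hlen]
    show _ :: pvTail n (h' - 1).toNat ++ pvBkt (pvF (max 0 (pvCnt n (h' - 1).toNat))) (k - h') = _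
    rw [pvF_clamp, ← pvCnt_succ']
    have hsplit : (k - 1).toNat = (h' - 1).toNat + ((k - h' - 1).toNat + 1) := by omega
    rw [hsplit, pvTail_add]
    unfold pvBkt
    have : pvCnt n ((h' - 1).toNat + 1) = pvCnt n h'.toNat := by
      have : (h' - 1).toNat + 1 = h'.toNat := by omega
      rw [this]
    rw [this]
    have : pvTail (pvCnt n (h' - 1).toNat) ((k - h' - 1).toNat + 1)
        = PySem.List.pyRange 0 (pvF (pvCnt n (h' - 1).toNat)) 1
          :: pvTail (pvF (pvCnt n (h' - 1).toNat)) (k - h' - 1).toNat := by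
      rw [pvTail]
    rw [this, ← pvCnt_succ']
    have h1 : (h' - 1).toNat + 1 = h'.toNat := by omega
    rw [h1]
    simp
termination_by k.toNat
decreasing_by
  · rw [PySem.Int.floordiv_eq_ediv_of_pos (by norm_num : (0:Int) < 2)]; omega
  · rw [PySem.Int.floordiv_eq_ediv_of_pos (by norm_num : (0:Int) < 2)]; omega

-- ===== VERDICT (by name: the statement is the Claim_ definition above) =====
theorem tournament_bracket_py_spec : Claim_equal_tournament_bracket_py := by
  intro n k _
  unfold Spec_tournament_bracket_py tournament_bracket_py
  simp only []
  rw [pv_foldA, pv_altB, PySem.List.length_pyRange_one]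
  simp [pvBkt]
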